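-- pv_equiv track=rewrite | github.com/alexander-tong/Python-Programs | rng_table_generator.py | gen_col_name
-- ===== SOURCE A (Python) =====
-- def gen_col_name(lists, col_orientation):
--     '''
--     Description:
--         Creates list of titles to len(list) or list[i].
--         Supports up to len 676 header names (i.e., permutations corresponding to 26*26 letters of alphabet)
--
--     Args:
--         lists (list): type must be list of int, float, string
--         col_orientation: horizontal; headers generated based on len(list)
--                          vertical; headers generated based on number of lists within list of lists
--
--     Returns:
--         headers for list of lists
--     '''
--     base = 'col'
--     alpha = 'a b c d e f g h i j k l m n o p q r s t u v w x y z'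
--     alpha_split = alpha.split(' ')
--     alpha_split_greater_than_26 = alpha.split(' ')
--     alpha_split_extend = alpha.split(' ')
--     count = 0
--     combined_title = []
--
--     if col_orientation == 'horizontal':
--         length_list = len(lists[0])
--     elif col_orientation == 'vertical':
--         length_list = len(lists)
--
--     if length_list < 26:
--         if col_orientation == 'horizontal':
--             while len(lists[0]) != len(alpha_split):
--                 alpha_split.pop()
--
--         elif col_orientation == 'vertical':
--             while len(lists) != len(alpha_split):
--                 alpha_split.pop()
--
--         for i in range(len(alpha_split)):
--             combined_title.append(base + ' ' + alpha_split[i])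
--
--     #support > len 27 values specified
--     #reset every 27, such that aa... az...; ba... bz;
--     else:
--         #since a... z is len 26, subtract
--         length = length_list - 26
--
--         while length > 0:
--             for i in range(length):
--                 alpha_split.append(alpha_split_greater_than_26[0] + alpha_split_extend[0])
--                 del alpha_split_extend[0]
--                 length -= 1
--                 count += 1
--                 if count == 26:
--                     count = 0
--                     alpha_split_extend = alpha.split(' ')
--                     del alpha_split_greater_than_26[0]
--
--         for i in range(len(alpha_split)):
--             combined_title.append(base + ' ' + alpha_split[i])
--
--     return combined_title
-- ===== SOURCE B (Python) =====
-- def gen_col_name(lists, col_orientation):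
--     if col_orientation == 'horizontal':
--         n = len(lists[0])
--     elif col_orientation == 'vertical':
--         n = len(lists)
--     alpha = [chr(ord('a') + k) for k in range(26)]
--     out = []
--     for i in range(n):
--         if i < 26:
--             out.append('col ' + alpha[i])
--         else:
--             m = i - 26
--             out.append('col ' + alpha[m // 26] + alpha[m % 26])
--     return out
-- ===== Notes on version B (the rewrite author's own statement) =====
-- stated objective: simpler
-- what changed: replaces A's pop-down alphabet list (for n<26) and the nested while/for loop with three mutating list copies and a wrap-around counter (for n>=26) by a single pass that derives each header directly from its index with modular arithmetic (alpha[m//26], alpha[m%26])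
import Mathlib
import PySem

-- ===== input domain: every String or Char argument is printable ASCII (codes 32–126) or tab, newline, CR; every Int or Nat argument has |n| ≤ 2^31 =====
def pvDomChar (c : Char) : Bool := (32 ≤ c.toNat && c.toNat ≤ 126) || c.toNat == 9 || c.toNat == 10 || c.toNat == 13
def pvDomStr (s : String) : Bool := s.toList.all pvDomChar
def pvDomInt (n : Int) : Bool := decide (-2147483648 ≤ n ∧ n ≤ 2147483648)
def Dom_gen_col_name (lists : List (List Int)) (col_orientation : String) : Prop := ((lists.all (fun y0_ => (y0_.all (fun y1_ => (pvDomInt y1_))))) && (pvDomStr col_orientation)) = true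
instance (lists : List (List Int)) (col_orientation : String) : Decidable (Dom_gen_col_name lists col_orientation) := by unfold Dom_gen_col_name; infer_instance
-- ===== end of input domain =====

-- B replaces A's pop-down list and nested mutating-counter loops by a single pass that
-- derives each header from its index by modular arithmetic (simpler, same O(n) cost).


-- ===== PORT A =====
def pvAlphaStr : String := "a b c d e f g h i j k l m n o p q r s t u v w x y z"

-- 'while len(...) != len(alpha_split): alpha_split.pop()' — pops from the end until the length is n
def pvPopDown (n : Nat) (xs : List String) : List String :=
  if xs.length = n then xs
  else match xs with
    | [] => []                -- Python's pop would raise here; unreachable when n ≤ xs.length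
    | y :: ys => pvPopDown n (y :: ys).dropLast
termination_by xs.length
decreasing_by simp

-- the 'while length > 0: for i in range(length): …' block, one append per step; fuel = length_list - 26
def pvLoopA : Nat → List String → List String → List String → Nat → List String
  | 0, split, _, _, _ => split
  | f + 1, split, g :: gs, e :: es, count =>
      if count + 1 = 26 then
        pvLoopA f (split ++ [g ++ e]) gs ((PySem.Str.split? pvAlphaStr " ").getD []) 0
      else
        pvLoopA f (split ++ [g ++ e]) (g :: gs) es (count + 1)
  | _ + 1, split, _, _, _ => split    -- Python raises IndexError here; excluded by Pre_

def gen_col_name (lists : List (List Int)) (col_orientation : String) : List String :=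
  let base := "col"
  let alphaSplit : List String := (PySem.Str.split? pvAlphaStr " ").getD []
  let lengthOpt : Option Nat :=
    if col_orientation = "horizontal" then
      match lists with
      | [] => none                     -- lists[0] raises IndexError
      | x :: _ => some x.length
    else if col_orientation = "vertical" then some lists.length
    else none                          -- length_list unbound: UnboundLocalError
  match lengthOpt with
  | none => []
  | some n =>
    if n < 26 then
      (pvPopDown n alphaSplit).map (fun s => base ++ " " ++ s)
    else
      (pvLoopA (n - 26) alphaSplit alphaSplit alphaSplit 0).map (fun s => base ++ " " ++ s)

-- ===== PORT B =====
def pvAlphaB : List String := (List.range 26).map (fun k => String.ofList [Char.ofNat (97 + k)])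

def pvLetterB (k : Nat) : String := pvAlphaB.getD k ""   -- Python raises IndexError for k ≥ 26; excluded by Pre_

def gen_col_name_alt (lists : List (List Int)) (col_orientation : String) : List String :=
  let nOpt : Option Nat :=
    if col_orientation = "horizontal" then
      match lists with
      | [] => none
      | x :: _ => some x.length
    else if col_orientation = "vertical" then some lists.length
    else none
  match nOpt with
  | none => []
  | some n =>
    (List.range n).map (fun i =>
      if i < 26 then "col " ++ pvLetterB i
      else
        let m := i - 26
        "col " ++ pvLetterB (m / 26) ++ pvLetterB (m % 26))

-- ===== PRECONDITION & SPEC =====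
-- Pre_ excludes exactly the inputs on which A raises: an orientation other than
-- 'horizontal'/'vertical' (UnboundLocalError), 'horizontal' with an empty outer list
-- (IndexError on lists[0]), and a dimension ≥ 703 (IndexError once the two-letter pool is exhausted).
def Pre_gen_col_name (lists : List (List Int)) (col_orientation : String) : Prop :=
  (col_orientation = "horizontal" ∧ lists ≠ [] ∧ (lists.headD []).length ≤ 702) ∨
  (col_orientation = "vertical" ∧ lists.length ≤ 702)
instance (lists : List (List Int)) (col_orientation : String) : Decidable (Pre_gen_col_name lists col_orientation) := by unfold Pre_gen_col_name; infer_instance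

def pvWitness_gen_col_name : List (List Int) × String := ([[1, 2, 3], [4]], "horizontal")

def Spec_gen_col_name (lists : List (List Int)) (col_orientation : String) (out : List String) : Prop := out = gen_col_name_alt lists col_orientation
instance (lists : List (List Int)) (col_orientation : String) (out : List String) : Decidable (Spec_gen_col_name lists col_orientation out) := by unfold Spec_gen_col_name; infer_instance

-- ===== CLAIM (what is proved, stated in full; the proofs are below) =====
def Claim_equal_gen_col_name : Prop := ∀ (lists : List (List Int)) (col_orientation : String), Dom_gen_col_name lists col_orientation → Pre_gen_col_name lists col_orientation → Spec_gen_col_name lists col_orientation (gen_col_name lists col_orientation)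

-- ===== LEMMAS AND PROOFS =====
-- abbreviations used only by the proofs
def pvL : List String := (PySem.Str.split? pvAlphaStr " ").getD []
def pvG (k : Nat) : String := pvL.getD (k / 26) "" ++ pvL.getD (k % 26) ""
def pvFB (i : Nat) : String :=
  if i < 26 then "col " ++ pvLetterB i
  else "col " ++ pvLetterB ((i - 26) / 26) ++ pvLetterB ((i - 26) % 26)

set_option maxRecDepth 4000 in
theorem pvL_drop_cons : ∀ k, k < 26 → pvL.drop k = pvL.getD k "" :: pvL.drop (k + 1) := by decide

theorem pvPopDown_eq_take (xs : List String) (n : Nat) (h : n ≤ xs.length) :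
    pvPopDown n xs = xs.take n := by
  by_cases he : xs.length = n
  · rw [pvPopDown.eq_def, if_pos he, ← he, List.take_length]
  · match xs with
    | [] => simp at he h; omega
    | y :: ys =>
      rw [pvPopDown.eq_def, if_neg he]
      show pvPopDown n (y :: ys).dropLast = _
      rw [pvPopDown_eq_take (y :: ys).dropLast n (by simp at he h ⊢; omega)]
      rw [List.dropLast_eq_take, List.take_take]
      congr 1
      simp at he h ⊢
      omega
termination_by xs.length
decreasing_by simp

theorem pv_shift (split : List String) (m f : Nat) :
    split ++ [pvL.getD (m / 26) "" ++ pvL.getD (m % 26) ""] ++ (List.range f).map (fun j => pvG (m + 1 + j)) =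
      split ++ (List.range (f + 1)).map (fun j => pvG (m + j)) := by
  rw [List.append_assoc]
  congr 1
  rw [List.range_succ_eq_map, List.map_cons, List.map_map, List.singleton_append]
  congr 1
  apply List.map_congr_left
  intro j _
  show pvG (m + 1 + j) = pvG (m + (j + 1))
  congr 1
  omega

theorem pvLoopA_spec : ∀ (fuel m : Nat) (split : List String), m + fuel ≤ 676 →
    pvLoopA fuel split (pvL.drop (m / 26)) (pvL.drop (m % 26)) (m % 26) =
      split ++ (List.range fuel).map (fun j => pvG (m + j)) := by
  intro fuel
  induction fuel with
  | zero => intro m split _; simp [pvLoopA]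
  | succ f ih =>
    intro m split h
    have hm : m < 676 := by omega
    have hdiv : m / 26 < 26 := by omega
    have hmod : m % 26 < 26 := by omega
    rw [pvL_drop_cons (m / 26) hdiv, pvL_drop_cons (m % 26) hmod]
    show pvLoopA (f + 1) split (pvL.getD (m / 26) "" :: pvL.drop (m / 26 + 1))
        (pvL.getD (m % 26) "" :: pvL.drop (m % 26 + 1)) (m % 26) = _
    rw [pvLoopA]
    by_cases hc : m % 26 + 1 = 26
    · rw [if_pos hc]
      have d1 : m / 26 + 1 = (m + 1) / 26 := by omega
      have d2 : (m + 1) % 26 = 0 := by omega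
      have e3 : (PySem.Str.split? pvAlphaStr " ").getD [] = pvL.drop ((m + 1) % 26) := by
        rw [d2, List.drop_zero]; rfl
      rw [d1, e3, show (0 : Nat) = (m + 1) % 26 from d2.symm]
      rw [ih (m + 1) _ (by omega)]
      exact pv_shift split m f
    · rw [if_neg hc]
      have hc' : m % 26 < 25 := by omega
      have d1 : (m + 1) / 26 = m / 26 := by omega
      have d2 : (m + 1) % 26 = m % 26 + 1 := by omega
      rw [← pvL_drop_cons (m / 26) hdiv]
      rw [show m / 26 = (m + 1) / 26 from d1.symm,
          show m % 26 + 1 = (m + 1) % 26 from d2.symm]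
      rw [ih (m + 1) _ (by omega)]
      rw [d1]
      exact pv_shift split m f

set_option maxRecDepth 4000 in
theorem pv_small : ∀ n, n < 26 →
    (pvL.take n).map (fun s => "col" ++ " " ++ s) = (List.range n).map pvFB := by decide

set_option maxRecDepth 4000 in
theorem pv_head26 : pvL.map (fun s => "col" ++ " " ++ s) = (List.range 26).map pvFB := by decide

set_option maxRecDepth 10000 in
set_option maxHeartbeats 1000000 in
theorem pv_pair : ∀ j, j < 676 → pvFB (26 + j) = "col" ++ " " ++ pvG j := by decide

theorem pvL_length : pvL.length = 26 := by decide

theorem pv_core (n : Nat) (hn : n ≤ 702) :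
    (if n < 26 then
      (pvPopDown n pvL).map (fun s => "col" ++ " " ++ s)
    else
      (pvLoopA (n - 26) pvL pvL pvL 0).map (fun s => "col" ++ " " ++ s)) =
    (List.range n).map pvFB := by
  by_cases h : n < 26
  · rw [if_pos h, pvPopDown_eq_take pvL n (by rw [pvL_length]; omega)]
    exact pv_small n h
  · rw [if_neg h]
    obtain ⟨k, rfl⟩ : ∃ k, n = 26 + k := ⟨n - 26, by omega⟩
    have hk : k ≤ 676 := by omega
    have hstart := pvLoopA_spec (26 + k - 26) 0 pvL (by omega)
    simp only [Nat.zero_div, Nat.zero_mod, List.drop_zero, Nat.zero_add] at hstart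
    rw [hstart, List.map_append, List.map_map]
    rw [List.range_add, List.map_append, List.map_map, ← pv_head26]
    rw [show 26 + k - 26 = k from by omega]
    congr 1
    apply List.map_congr_left
    intro j hj
    simp only [List.mem_range] at hj
    show ("col" ++ " " ++ pvG j) = pvFB (26 + j)
    exact (pv_pair j (by omega)).symm

-- ===== VERDICT (by name: the statement is the Claim_ definition above) =====
theorem gen_col_name_spec : Claim_equal_gen_col_name := by
  intro lists co _ hpre
  unfold Spec_gen_col_name gen_col_name gen_col_name_alt
  rcases hpre with ⟨hco, hne, hlen⟩ | ⟨hco, hlen⟩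
  · subst hco
    obtain ⟨x, t, rfl⟩ : ∃ x t, lists = x :: t := by
      cases lists with
      | nil => exact absurd rfl hne
      | cons x t => exact ⟨x, t, rfl⟩
    simp only [reduceIte]
    exact pv_core x.length (by simpa using hlen)
  · subst hco
    simp only [reduceIte]
    exact pv_core lists.length hlen
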